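-- pv_equiv track=rewrite | github.com/JasonShevik/minotaur-chess-ai | chess_graph.py | get_king_neighbors
-- ===== SOURCE A (Python) =====
-- from typing import List, Tuple, Callable, Dict, Any, Optional, Union
--
-- def get_king_neighbors(start_coordinates: Tuple[int, int]) -> set[Tuple[int, int]]:
--     """
--     Gets the list of all possible king moves from this position.
--     :param start_coordinates: The coordinates that the king starts on in the format [row, column].
--     :return: A lit of coordinates of where the king could move from the start.
--     """
--     row: int
--     column: int
--     row, column = start_coordinates
--
--     return remove_invalid_coordinates({(row + row_offset, column + column_offset)
--                                         for row_offset in [-1, 0, 1]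
--                                         for column_offset in [-1, 0, 1]
--                                         if not (row_offset == 0 and column_offset == 0)})
--
-- def remove_invalid_coordinates(coordinate_list: set[Tuple[int, int]]) -> set[Tuple[int, int]]:
--     """
--     Removes the invalid moves (those not falling on the standard 8x8 board) from a list.
--     :param coordinate_list: The list of theoretical moves that may go off the board.
--     :return: A subset of the coordinate_list where all coordinates are within the bounds of a chess board.
--     """
--     return {(row, column) for row, column in coordinate_list if all(0 <= coord <= 7 for coord in (row, column))}
-- ===== SOURCE B (Python) =====
-- def get_king_neighbors(start_coordinates):
--     row, column = start_coordinates
--     return {(r, c)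
--             for r in range(max(0, row - 1), min(7, row + 1) + 1)
--             for c in range(max(0, column - 1), min(7, column + 1) + 1)
--             if (r, c) != (row, column)}
-- ===== Notes on version B (the rewrite author's own statement) =====
-- stated objective: simpler
-- what changed: B replaces A's generate-9-offsets-then-filter-with-a-helper pipeline by a single comprehension over edge-clamped row/column ranges that only ever produces in-bounds squares, skipping the center.
import Mathlib
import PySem

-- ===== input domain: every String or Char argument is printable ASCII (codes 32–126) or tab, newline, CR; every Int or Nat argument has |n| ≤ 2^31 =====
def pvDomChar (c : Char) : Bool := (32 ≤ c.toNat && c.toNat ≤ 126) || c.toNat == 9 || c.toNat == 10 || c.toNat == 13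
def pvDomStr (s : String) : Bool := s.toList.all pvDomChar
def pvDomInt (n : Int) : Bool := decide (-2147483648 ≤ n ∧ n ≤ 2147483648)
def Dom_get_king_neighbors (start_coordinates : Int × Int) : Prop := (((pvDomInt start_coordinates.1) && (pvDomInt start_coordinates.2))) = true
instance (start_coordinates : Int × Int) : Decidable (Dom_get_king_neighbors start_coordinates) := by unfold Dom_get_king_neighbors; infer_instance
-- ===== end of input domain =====

-- B replaces A's generate-9-offsets-then-filter pipeline by one comprehension over edge-clamped ranges (objective: simpler).


-- ===== PORT A =====
def remove_invalid_coordinates (coordinate_list : PySem.Set (Int × Int)) : PySem.Set (Int × Int) :=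
  PySem.Set.ofList (coordinate_list.filter (fun p => ([p.1, p.2] : List Int).all (fun coord => decide (0 ≤ coord ∧ coord ≤ 7))))

def get_king_neighbors (start_coordinates : Int × Int) : List (Int × Int) :=
  let row := start_coordinates.1
  let column := start_coordinates.2
  remove_invalid_coordinates (PySem.Set.ofList
    (([-1, 0, 1] : List Int).flatMap (fun row_offset =>
      ([-1, 0, 1] : List Int).filterMap (fun column_offset =>
        if !(row_offset == 0 && column_offset == 0) then
          some (row + row_offset, column + column_offset)
        else none))))

-- ===== PORT B =====
def get_king_neighbors_alt (start_coordinates : Int × Int) : List (Int × Int) :=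
  let row := start_coordinates.1
  let column := start_coordinates.2
  PySem.Set.ofList
    ((PySem.List.pyRange (max 0 (row - 1)) (min 7 (row + 1) + 1) 1).flatMap (fun r =>
      (PySem.List.pyRange (max 0 (column - 1)) (min 7 (column + 1) + 1) 1).filterMap (fun c =>
        if (r, c) ≠ (row, column) then some (r, c) else none)))

-- ===== PRECONDITION & SPEC =====
def Spec_get_king_neighbors (start_coordinates : Int × Int) (out : List (Int × Int)) : Prop := out = get_king_neighbors_alt start_coordinates
instance (start_coordinates : Int × Int) (out : List (Int × Int)) : Decidable (Spec_get_king_neighbors start_coordinates out) := by unfold Spec_get_king_neighbors; infer_instance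

-- ===== CLAIM (what is proved, stated in full; the proofs are below) =====
def Claim_equal_get_king_neighbors : Prop := ∀ (start_coordinates : Int × Int), Dom_get_king_neighbors start_coordinates → Spec_get_king_neighbors start_coordinates (get_king_neighbors start_coordinates)

-- ===== LEMMAS AND PROOFS =====

theorem pyRange_one_nil (a b : Int) (h : b <= a) : PySem.List.pyRange a b 1 = [] := by
  simp [PySem.List.pyRange]; omega

-- B's clamped range is exactly the in-bounds filter of the three candidate rows (resp. columns).
theorem clamped_range_eq (x : Int) :
    PySem.List.pyRange (max 0 (x - 1)) (min 7 (x + 1) + 1) 1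
      = ([x - 1, x, x + 1] : List Int).filter (fun r => decide (0 ≤ r ∧ r ≤ 7)) := by
  rcases (by omega : x ≤ -2 ∨ 9 ≤ x ∨ x = -1 ∨ x = 0 ∨ x = 7 ∨ x = 8 ∨ (1 ≤ x ∧ x ≤ 6)) with
    h | h | h | h | h | h | h
  · have e1 : (decide (0 ≤ x - 1 ∧ x - 1 ≤ 7)) = false := by simp; omega
    have e2 : (decide (0 ≤ x ∧ x ≤ 7)) = false := by simp; omega
    have e3 : (decide (0 ≤ x + 1 ∧ x + 1 ≤ 7)) = false := by simp; omega
    rw [pyRange_one_nil _ _ (by omega)]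
    simp only [List.filter, e1, e2, e3]
  · have e1 : (decide (0 ≤ x - 1 ∧ x - 1 ≤ 7)) = false := by simp; omega
    have e2 : (decide (0 ≤ x ∧ x ≤ 7)) = false := by simp; omega
    have e3 : (decide (0 ≤ x + 1 ∧ x + 1 ≤ 7)) = false := by simp; omega
    rw [pyRange_one_nil _ _ (by omega)]
    simp only [List.filter, e1, e2, e3]
  · subst h; decide
  · subst h; decide
  · subst h; decide
  · subst h; decide
  · have hm : max 0 (x - 1) = x - 1 := by omega
    have hn : min 7 (x + 1) + 1 = x + 2 := by omega
    rw [hm, hn]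
    rw [PySem.List.pyRange_one_cons (by omega : x - 1 < x + 2)]
    rw [PySem.List.pyRange_one_cons (by omega : x - 1 + 1 < x + 2)]
    rw [PySem.List.pyRange_one_cons (by omega : x - 1 + 1 + 1 < x + 2)]
    rw [pyRange_one_nil _ _ (by omega)]
    have e1 : (decide (0 ≤ x - 1 ∧ x - 1 ≤ 7)) = true := by simp; omega
    have e2 : (decide (0 ≤ x ∧ x ≤ 7)) = true := by simp; omega
    have e3 : (decide (0 ≤ x + 1 ∧ x + 1 ≤ 7)) = true := by simp; omega
    simp only [List.filter, e1, e2, e3]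
    have a1 : x - 1 + 1 = x := by omega
    rw [a1]

-- A's bounds filter applied to one row of the skip-center comprehension: in-bounds row keeps the in-bounds columns
theorem inner_filter_pos (row col r : Int) (C : List Int) (hr : 0 ≤ r ∧ r ≤ 7) :
    ((C.filterMap (fun c => if (r, c) ≠ (row, col) then some (r, c) else none)).filter
        (fun p => decide (0 ≤ p.1 ∧ p.1 ≤ 7) && decide (0 ≤ p.2 ∧ p.2 ≤ 7)))
    = (C.filter (fun c => decide (0 ≤ c ∧ c ≤ 7))).filterMap
        (fun c => if (r, c) ≠ (row, col) then some (r, c) else none) := by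
  induction C with
  | nil => rfl
  | cons c C ih =>
    simp only [List.filterMap_cons, List.filter_cons]
    by_cases hne : (r, c) ≠ (row, col)
    · rw [if_pos hne]
      by_cases hc : 0 ≤ c ∧ c ≤ 7
      · simp only [List.filter_cons, decide_eq_true hr, decide_eq_true hc, Bool.and_self,
          if_pos, List.filterMap_cons, if_pos hne, ih]
      · have hcf : (decide (0 ≤ c ∧ c ≤ 7)) = false := by simpa using hc
        simp only [List.filter_cons, decide_eq_true hr, hcf, Bool.true_and, if_neg, ih,
          Bool.false_eq_true, not_false_eq_true]
    · rw [if_neg hne]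
      by_cases hc : 0 ≤ c ∧ c ≤ 7
      · have hcf : (decide (0 ≤ c ∧ c ≤ 7)) = true := by simpa using hc
        simp only [hcf, if_pos, List.filterMap_cons, if_neg hne, ih]
      · have hcf : (decide (0 ≤ c ∧ c ≤ 7)) = false := by simpa using hc
        simp only [hcf, Bool.false_eq_true, not_false_eq_true, if_neg, ih]

-- an out-of-bounds row contributes nothing after filtering
theorem inner_filter_neg (row col r : Int) (C : List Int) (hr : ¬ (0 ≤ r ∧ r ≤ 7)) :
    ((C.filterMap (fun c => if (r, c) ≠ (row, col) then some (r, c) else none)).filter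
        (fun p => decide (0 ≤ p.1 ∧ p.1 ≤ 7) && decide (0 ≤ p.2 ∧ p.2 ≤ 7)))
    = [] := by
  have hrf : (decide (0 ≤ r ∧ r ≤ 7)) = false := by simpa using hr
  induction C with
  | nil => rfl
  | cons c C ih =>
    simp only [List.filterMap_cons]
    by_cases hne : (r, c) ≠ (row, col)
    · rw [if_pos hne, List.filter_cons]
      simp only [hrf, Bool.false_and, Bool.false_eq_true, not_false_eq_true, if_neg, ih]
    · rw [if_neg hne]
      exact ih

-- filtering the whole comprehension = filtering each axis first
theorem filter_flatMap_comm (R C : List Int) (row col : Int) :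
    ((R.flatMap (fun r => C.filterMap (fun c =>
        if (r, c) ≠ (row, col) then some (r, c) else none))).filter
      (fun p => decide (0 ≤ p.1 ∧ p.1 ≤ 7) && decide (0 ≤ p.2 ∧ p.2 ≤ 7)))
    = (R.filter (fun r => decide (0 ≤ r ∧ r ≤ 7))).flatMap (fun r =>
        (C.filter (fun c => decide (0 ≤ c ∧ c ≤ 7))).filterMap (fun c =>
          if (r, c) ≠ (row, col) then some (r, c) else none)) := by
  induction R with
  | nil => rfl
  | cons r R ih =>
    simp only [List.flatMap_cons, List.filter_append, ih, List.filter_cons]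
    by_cases hr : 0 ≤ r ∧ r ≤ 7
    · rw [inner_filter_pos row col r C hr]
      simp only [decide_eq_true hr, if_pos, List.flatMap_cons]
    · rw [inner_filter_neg row col r C hr]
      have hrf : (decide (0 ≤ r ∧ r ≤ 7)) = false := by simpa using hr
      simp only [hrf, Bool.false_eq_true, not_false_eq_true, if_neg, List.nil_append]

-- A's raw offset list, rewritten with absolute coordinates and the skip-center test
theorem offsets_eq (row col : Int) :
    ([-1, 0, 1] : List Int).flatMap (fun ro =>
      ([-1, 0, 1] : List Int).filterMap (fun co =>
        if !(ro == 0 && co == 0) then some (row + ro, col + co) else none))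
    = ([row - 1, row, row + 1] : List Int).flatMap (fun r =>
        ([col - 1, col, col + 1] : List Int).filterMap (fun c =>
          if (r, c) ≠ (row, col) then some (r, c) else none)) := by
  have h1 : row - 1 ≠ row := by omega
  have h2 : row + 1 ≠ row := by omega
  have h3 : col - 1 ≠ col := by omega
  have h4 : col + 1 ≠ col := by omega
  simp [List.flatMap_cons, List.filterMap, Prod.mk.injEq, h1, h2, h3, h4]
  omega

-- A's eight candidate squares are pairwise distinct, so set() keeps them all in order
theorem offsets_nodup (row col : Int) :
    (([row - 1, row, row + 1] : List Int).flatMap (fun r =>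
        ([col - 1, col, col + 1] : List Int).filterMap (fun c =>
          if (r, c) ≠ (row, col) then some (r, c) else none))).Nodup := by
  simp only [List.flatMap_cons, List.flatMap_nil, List.filterMap_cons, List.filterMap_nil]
  rw [if_pos (by simp), if_pos (by simp), if_pos (by simp),
      if_pos (by simp), if_neg (by simp), if_pos (by simp),
      if_pos (by simp), if_pos (by simp), if_pos (by simp)]
  simp [List.Nodup, Prod.mk.injEq]
  omega

theorem get_king_neighbors_eq (row col : Int) :
    get_king_neighbors (row, col) = get_king_neighbors_alt (row, col) := by
  unfold get_king_neighbors get_king_neighbors_alt remove_invalid_coordinates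
  simp only
  rw [offsets_eq row col]
  rw [PySem.Set.ofList_eq_self_of_nodup _ (offsets_nodup row col)]
  rw [clamped_range_eq row, clamped_range_eq col]
  rw [List.filter_congr (fun p _ => by
    show ([p.1, p.2].all fun coord => decide (0 ≤ coord ∧ coord ≤ 7))
        = (decide (0 ≤ p.1 ∧ p.1 ≤ 7) && decide (0 ≤ p.2 ∧ p.2 ≤ 7))
    simp)]
  rw [filter_flatMap_comm]

-- ===== VERDICT (by name: the statement is the Claim_ definition above) =====
theorem get_king_neighbors_spec : Claim_equal_get_king_neighbors := by
  intro sc _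
  unfold Spec_get_king_neighbors
  obtain ⟨row, col⟩ := sc
  exact get_king_neighbors_eq row col
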